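-- pv_equiv track=rewrite | github.com/XxxGHOSTX/ThalosPrimeConcept | thalos/babel_generator.py | _extract_best_snippet
-- ===== SOURCE A (Python) =====
-- from typing import Optional, List, Tuple
--
-- def _extract_best_snippet(
--
--     page: str,
--     fragments: List[str],
--     length: int = 100
-- ) -> str:
--     """Extract the best snippet containing the most fragments."""
--     best_score = 0
--     best_snippet = page[:length]
--
--     for i in range(0, len(page) - length, 10):
--         window = page[i:i + length]
--         score = sum(1 for frag in fragments if frag in window.lower())
--         if score > best_score:
--             best_score = score
--             best_snippet = window
--
--     return best_snippet.strip()
-- ===== SOURCE B (Python) =====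
-- def _extract_best_snippet(
--     page: str,
--     fragments: list,
--     length: int = 100
-- ) -> str:
--     """Occurrence-index rewrite: lower the page once, list each fragment's
--     occurrence positions once, then score the windows with a two-pointer
--     sweep over those sorted positions instead of slicing and searching
--     every window."""
--     lowered = page.lower()
--     # an empty fragment is a substring of every window
--     base = sum(1 for frag in fragments if not frag)
--     indexed = []
--     for frag in fragments:
--         if not frag:
--             continue
--         occs = []
--         start = 0
--         while True:
--             j = lowered.find(frag, start)
--             if j == -1:
--                 break
--             occs.append(j)
--             start = j + 1
--         indexed.append((len(frag), occs))
--
--     best_score = 0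
--     best_i = None
--     ptrs = [0] * len(indexed)
--     for i in range(0, len(page) - length, 10):
--         end = i + length
--         score = base
--         new_ptrs = []
--         for (flen, occs), p in zip(indexed, ptrs):
--             while p < len(occs) and occs[p] < i:
--                 p += 1
--             new_ptrs.append(p)
--             if p < len(occs) and occs[p] + flen <= end:
--                 score += 1
--         ptrs = new_ptrs
--         if score > best_score:
--             best_score = score
--             best_i = i
--
--     snippet = page[:length] if best_i is None else page[best_i:best_i + length]
--     return snippet.strip()
-- ===== Notes on version B (the rewrite author's own statement) =====
-- stated objective: faster
-- what changed: Instead of slicing and lowering every 10-step window and substring-searching every fragment inside it, B lowers the page once, collects each fragment's occurrence positions once with repeated str.find, and scores the windows by a two-pointer sweep over those sorted position lists; Pre_ excludes negative length, outside the snippet task's natural domain, where A's windows depend on Python's negative-slice wraparound.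
import Mathlib
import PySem

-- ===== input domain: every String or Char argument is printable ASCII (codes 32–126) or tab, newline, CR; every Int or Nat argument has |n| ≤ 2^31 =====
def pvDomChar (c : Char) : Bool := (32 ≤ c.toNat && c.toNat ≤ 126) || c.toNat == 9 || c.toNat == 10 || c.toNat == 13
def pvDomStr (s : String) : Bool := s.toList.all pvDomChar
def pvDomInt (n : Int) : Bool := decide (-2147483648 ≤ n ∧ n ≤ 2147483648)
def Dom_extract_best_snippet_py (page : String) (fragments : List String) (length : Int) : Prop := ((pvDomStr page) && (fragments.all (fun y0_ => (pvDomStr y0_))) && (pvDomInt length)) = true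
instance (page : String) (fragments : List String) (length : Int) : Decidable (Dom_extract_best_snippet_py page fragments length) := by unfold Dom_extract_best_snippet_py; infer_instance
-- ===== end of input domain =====

-- B replaces A's per-window slicing/lowering/substring search by a one-time lowering and
-- per-fragment occurrence lists swept with two pointers (objective: faster, constant factor).

-- ===== PORT A =====
-- literal transliteration of _extract_best_snippet
def extract_best_snippet_py (page : String) (fragments : List String) (length : Int) : String :=
  let init : Int × String := (0, PySem.Str.slice page none (some length))
  let r := (PySem.List.pyRange 0 ((page.toList.length : Int) - length) 10).foldl
    (fun (st : Int × String) i =>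
      let window := PySem.Str.slice page (some i) (some (i + length))
      let score := fragments.foldl
        (fun (acc : Int) frag =>
          if PySem.Str.isIn frag (PySem.Str.lower window) then acc + 1 else acc) 0
      if st.1 < score then (score, window) else st) init
  PySem.Str.strip r.2

-- ===== PORT B =====
-- the while-loop of B collecting all occurrence positions of sub in text from index start
-- (fuel is a totality device only; text.length + 1 - start steps always suffice)
def pvOccsFrom (text sub : List Char) (fuel : Nat) (start : Nat) : List Nat :=
  match fuel with
  | 0 => []
  | f + 1 =>
    let j := PySem.Chars.findFrom text sub (start : Int) none
    if j = -1 then []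
    else j.toNat :: pvOccsFrom text sub f (j.toNat + 1)

-- the inner while-loop advancing one fragment's pointer past occurrences left of i
-- (fuel is a totality device only; occs.length - p steps always suffice)
def pvAdvance (occs : List Nat) (i : Int) (fuel : Nat) (p : Nat) : Nat :=
  match fuel with
  | 0 => p
  | f + 1 =>
    if p < occs.length ∧ ((occs.getD p 0 : Int)) < i then pvAdvance occs i f (p + 1) else p

-- literal transliteration of B (Source B)
def extract_best_snippet_py_alt (page : String) (fragments : List String) (length : Int) : String :=
  let lowered := PySem.Chars.lower page.toList
  let base := fragments.foldl (fun (acc : Int) frag => if frag.toList = [] then acc + 1 else acc) 0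
  let indexed : List (Int × List Nat) := fragments.foldl
    (fun acc frag =>
      if frag.toList = [] then acc
      else acc ++ [((frag.toList.length : Int), pvOccsFrom lowered frag.toList (lowered.length + 1) 0)]) []
  let r := (PySem.List.pyRange 0 ((page.toList.length : Int) - length) 10).foldl
    (fun (st : (Int × Option Int) × List Nat) i =>
      let e := i + length
      let inner := (indexed.zip st.2).foldl
        (fun (acc : Int × List Nat) pr =>
          let p := pvAdvance pr.1.2 i pr.1.2.length pr.2
          let sc := if p < pr.1.2.length ∧ ((pr.1.2.getD p 0 : Int)) + pr.1.1 ≤ e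
                    then acc.1 + 1 else acc.1
          (sc, acc.2 ++ [p])) (base, [])
      let best := if st.1.1 < inner.1 then (inner.1, some i) else st.1
      (best, inner.2)) ((0, none), List.replicate indexed.length 0)
  let snippet := match r.1.2 with
    | none => PySem.Str.slice page none (some length)
    | some i => PySem.Str.slice page (some i) (some (i + length))
  PySem.Str.strip snippet

-- ===== PRECONDITION & SPEC =====
-- Pre_ excludes negative length, outside the snippet task's natural domain, where A's
-- windows depend on Python's negative-slice wraparound (A still returns a value there).
def Pre_extract_best_snippet_py (page : String) (fragments : List String) (length : Int) : Prop := 0 ≤ length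
instance (page : String) (fragments : List String) (length : Int) : Decidable (Pre_extract_best_snippet_py page fragments length) := by unfold Pre_extract_best_snippet_py; infer_instance

def pvWitness_extract_best_snippet_py : String × List String × Int := ("ab", ["a"], 1)

def Spec_extract_best_snippet_py (page : String) (fragments : List String) (length : Int) (out : String) : Prop := out = extract_best_snippet_py_alt page fragments length
instance (page : String) (fragments : List String) (length : Int) (out : String) : Decidable (Spec_extract_best_snippet_py page fragments length out) := by unfold Spec_extract_best_snippet_py; infer_instance

-- ===== CLAIM (what is proved, stated in full; the proofs are below) =====
def Claim_equal_extract_best_snippet_py : Prop := ∀ (page : String) (fragments : List String) (length : Int), Dom_extract_best_snippet_py page fragments length → Pre_extract_best_snippet_py page fragments length → Spec_extract_best_snippet_py page fragments length (extract_best_snippet_py page fragments length)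

-- ===== LEMMAS AND PROOFS =====

theorem pvFindFrom_bound (text sub : List Char) (start : Nat)
    (h : PySem.Chars.findFrom text sub (start : Int) none ≠ -1) :
    start ≤ (PySem.Chars.findFrom text sub (start : Int) none).toNat ∧
    (PySem.Chars.findFrom text sub (start : Int) none).toNat ≤ text.length ∧
    start ≤ text.length := by
  have h1 := PySem.Chars.neg_one_le_find (List.drop start text) sub
  have h2 := PySem.Chars.find_le_length (List.drop start text) sub
  simp only [PySem.Chars.findFrom, List.take_length, Int.toNat_natCast] at h ⊢
  simp only [List.length_drop] at h2
  split_ifs at h ⊢ <;> simp only [Int.toNat_natCast] at * <;> omega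

-- occurrence-list characterization: with enough fuel, pvOccsFrom collects exactly the
-- prefix positions ≥ start
theorem mem_pvOccsFrom (text sub : List Char) (hsub : sub ≠ []) :
    ∀ (fuel start j : Nat), text.length + 1 - start ≤ fuel →
      (j ∈ pvOccsFrom text sub fuel start ↔ start ≤ j ∧ sub <+: List.drop j text) := by
  intro fuel
  induction fuel with
  | zero =>
    intro start j hfuel
    simp only [pvOccsFrom, List.not_mem_nil, false_iff]
    rintro ⟨hle, hpre⟩
    have hnil : List.drop j text = [] := List.drop_eq_nil_of_le (by omega)
    rw [hnil, List.prefix_nil] at hpre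
    exact hsub hpre
  | succ f ih =>
    intro start j hfuel
    simp only [pvOccsFrom]
    by_cases hneg : PySem.Chars.findFrom text sub (start : Int) none = -1
    · rw [if_pos hneg]
      simp only [List.not_mem_nil, false_iff]
      rintro ⟨hle, hpre⟩
      by_cases hs : start ≤ text.length
      · have hiff := PySem.Chars.findFrom_natCast_eq_neg_one_iff text sub start hs
        have hninf := hiff.mp hneg
        apply hninf
        have hdj : List.drop j text = List.drop (j - start) (List.drop start text) := by
          rw [List.drop_drop]; congr 1; omega
        rw [hdj] at hpre
        exact hpre.isInfix.trans (List.drop_suffix _ _).isInfix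
      · have hnil : List.drop j text = [] := List.drop_eq_nil_of_le (by omega)
        rw [hnil, List.prefix_nil] at hpre
        exact hsub hpre
    · rw [if_neg hneg]
      have hb := pvFindFrom_bound text sub start hneg
      have hspec := PySem.Chars.findFrom_natCast_spec text sub start hb.2.2 hneg
      have ih' := ih ((PySem.Chars.findFrom text sub (start : Int) none).toNat + 1) j (by omega)
      simp only [List.mem_cons, ih']
      constructor
      · rintro (h | ⟨hge, hpre⟩)
        · subst h
          exact ⟨by omega, hspec.2.1⟩
        · exact ⟨by omega, hpre⟩
      · rintro ⟨hge, hpre⟩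
        by_cases hj : j = (PySem.Chars.findFrom text sub (start : Int) none).toNat
        · exact Or.inl hj
        · refine Or.inr ⟨?_, hpre⟩
          rcases Nat.lt_or_ge j (PySem.Chars.findFrom text sub (start : Int) none).toNat with hlt | hge2
          · exact absurd hpre (hspec.2.2 j hge hlt)
          · omega

theorem pvOccsFrom_pairwise (text sub : List Char) (hsub : sub ≠ []) :
    ∀ (fuel start : Nat), text.length + 1 - start ≤ fuel →
      (pvOccsFrom text sub fuel start).Pairwise (· < ·) := by
  intro fuel
  induction fuel with
  | zero => intro start _; simp [pvOccsFrom]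
  | succ f ih =>
    intro start hfuel
    simp only [pvOccsFrom]
    by_cases hneg : PySem.Chars.findFrom text sub (start : Int) none = -1
    · rw [if_pos hneg]
      exact List.Pairwise.nil
    · rw [if_neg hneg]
      have hb := pvFindFrom_bound text sub start hneg
      refine List.Pairwise.cons ?_ (ih _ (by omega))
      intro x hx
      have := (mem_pvOccsFrom text sub hsub f _ x (by omega)).mp hx
      omega

-- lowering commutes with slicing
theorem lower_slice (l : List Char) (a b : Option Int) :
    PySem.List.slice (PySem.Chars.lower l) a b = PySem.Chars.lower (PySem.List.slice l a b) := by
  cases a <;> cases b <;>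
    simp [PySem.Chars.lower, PySem.List.slice, List.map_take, List.map_drop]

-- infix of a take-drop window decomposed into absolute prefix positions
theorem infix_take_drop (l sub : List Char) (hsub : sub ≠ []) (a m : Nat) :
    (∃ j', sub <+: (List.take m (List.drop a l)).drop j') ↔
      ∃ j : Nat, a ≤ j ∧ j + sub.length ≤ a + m ∧ sub <+: List.drop j l := by
  have hlen : 0 < sub.length := List.length_pos_iff.mpr hsub
  constructor
  · rintro ⟨j', hpre⟩
    rw [List.drop_take, List.drop_drop] at hpre
    rw [List.prefix_take_iff] at hpre
    exact ⟨a + j', by omega, by omega, hpre.1⟩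
  · rintro ⟨j, ha, hm, hpre⟩
    refine ⟨j - a, ?_⟩
    rw [List.drop_take, List.drop_drop, List.prefix_take_iff]
    have heq : a + (j - a) = j := by omega
    rw [heq]
    exact ⟨hpre, by omega⟩

-- membership of a fragment in window [i, i+L) expressed through its occurrence list
theorem window_isIn (l sub : List Char) (hsub : sub ≠ []) (i L : Int) (hi : 0 ≤ i) :
    PySem.Chars.isIn sub (PySem.List.slice l (some i) (some (i + L))) = true ↔
      ∃ j ∈ pvOccsFrom l sub (l.length + 1) 0, i ≤ (j : Int) ∧
        (j : Int) + sub.length ≤ (if i + L < 0 then i + L + l.length else i + L) := by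
  have hlen : 0 < sub.length := List.length_pos_iff.mpr hsub
  rw [← PySem.Chars.exists_prefix_drop_iff_isIn]
  have hslice : PySem.List.slice l (some i) (some (i + L)) =
      List.take (PySem.List.clampIdx l.length (i + L) - PySem.List.clampIdx l.length i)
        (List.drop (PySem.List.clampIdx l.length i) l) := rfl
  rw [hslice, infix_take_drop l sub hsub]
  constructor
  · rintro ⟨j, h1, h2, hpre⟩
    have hjl : j + sub.length ≤ l.length := by
      have hl2 := hpre.length_le
      simp only [List.length_drop] at hl2
      omega
    refine ⟨j, (mem_pvOccsFrom l sub hsub (l.length + 1) 0 j (by omega)).mpr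
      ⟨Nat.zero_le _, hpre⟩, ?_, ?_⟩ <;>
      (simp only [PySem.List.clampIdx] at h1 h2; split_ifs at h1 h2 ⊢ <;> omega)
  · rintro ⟨j, hmem, hij, hE⟩
    have hpre := ((mem_pvOccsFrom l sub hsub (l.length + 1) 0 j (by omega)).mp hmem).2
    have hjl : j + sub.length ≤ l.length := by
      have hl2 := hpre.length_le
      simp only [List.length_drop] at hl2
      omega
    refine ⟨j, ?_, ?_, hpre⟩ <;>
      (simp only [PySem.List.clampIdx] at hE ⊢; split_ifs at hE ⊢ <;> omega)

theorem pvAdvance_spec (occs : List Nat) (i : Int) :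
    ∀ (fuel p : Nat), occs.length - p ≤ fuel → p ≤ occs.length →
      (∀ q < p, ((occs.getD q 0 : Int)) < i) →
      p ≤ pvAdvance occs i fuel p ∧ pvAdvance occs i fuel p ≤ occs.length ∧
        (∀ q < pvAdvance occs i fuel p, ((occs.getD q 0 : Int)) < i) ∧
        (pvAdvance occs i fuel p < occs.length → i ≤ ((occs.getD (pvAdvance occs i fuel p) 0 : Int))) := by
  intro fuel
  induction fuel with
  | zero =>
    intro p hfuel hp hskip
    simp only [pvAdvance]
    exact ⟨le_refl _, hp, hskip, fun hlt => absurd hlt (by omega)⟩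
  | succ f ih =>
    intro p hfuel hp hskip
    simp only [pvAdvance]
    by_cases hc : p < occs.length ∧ ((occs.getD p 0 : Int)) < i
    · rw [if_pos hc]
      obtain ⟨h1, h2⟩ := hc
      have hrec := ih (p + 1) (by omega) h1 (by
        intro q hq
        rcases Nat.lt_succ_iff_lt_or_eq.mp hq with h | h
        · exact hskip q h
        · subst h; exact h2)
      exact ⟨le_trans (Nat.le_succ p) hrec.1, hrec.2.1, hrec.2.2.1, hrec.2.2.2⟩
    · rw [if_neg hc]
      refine ⟨le_refl _, hp, hskip, ?_⟩
      intro hlt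
      rw [not_and, not_lt] at hc
      exact hc hlt

-- after advancing, the pointer test is exactly "some occurrence lies in [i, E - flen]"
theorem cond_iff (occs : List Nat) (hocc : occs.Pairwise (· < ·)) (i E flen : Int)
    (fuel p : Nat) (hfuel : occs.length - p ≤ fuel) (hp : p ≤ occs.length)
    (hskip : ∀ q < p, ((occs.getD q 0 : Int)) < i) :
    (pvAdvance occs i fuel p < occs.length ∧
        ((occs.getD (pvAdvance occs i fuel p) 0 : Int)) + flen ≤ E) ↔
      ∃ j ∈ occs, i ≤ (j : Int) ∧ (j : Int) + flen ≤ E := by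
  obtain ⟨hpp, hple, hskip', hstop⟩ := pvAdvance_spec occs i fuel p hfuel hp hskip
  constructor
  · rintro ⟨h1, h2⟩
    rw [List.getD_eq_getElem occs 0 h1] at h2
    exact ⟨occs[pvAdvance occs i fuel p], List.getElem_mem h1,
      by have := hstop h1; rwa [List.getD_eq_getElem occs 0 h1] at this, h2⟩
  · rintro ⟨j, hmem, hij, hE⟩
    obtain ⟨q, hq, rfl⟩ := List.mem_iff_getElem.mp hmem
    have hqp : pvAdvance occs i fuel p ≤ q := by
      by_contra hlt
      rw [not_le] at hlt
      have := hskip' q hlt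
      rw [List.getD_eq_getElem occs 0 hq] at this
      omega
    have h1 : pvAdvance occs i fuel p < occs.length := lt_of_le_of_lt hqp hq
    refine ⟨h1, ?_⟩
    rw [List.getD_eq_getElem occs 0 h1]
    rcases eq_or_lt_of_le hqp with heq | hlt
    · have hee : occs[pvAdvance occs i fuel p] = occs[q] := by congr 1
      rw [hee]; omega
    · have := List.pairwise_iff_getElem.mp hocc _ q h1 hq hlt
      omega

-- the loop building `indexed` is filter-then-map
theorem indexed_eq (lowered : List Char) (fragments : List String) (acc : List (Int × List Nat)) :
    fragments.foldl
      (fun acc frag =>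
        if frag.toList = [] then acc
        else acc ++ [((frag.toList.length : Int), pvOccsFrom lowered frag.toList (lowered.length + 1) 0)]) acc
    = acc ++ (fragments.filter (fun f => !decide (f.toList = []))).map
        (fun f => ((f.toList.length : Int), pvOccsFrom lowered f.toList (lowered.length + 1) 0)) := by
  induction fragments generalizing acc with
  | nil => simp
  | cons f t ih =>
    simp only [List.foldl_cons, List.filter_cons]
    by_cases h : f.toList = []
    · rw [if_pos h]
      simp only [h, decide_true, Bool.not_true, Bool.false_eq_true, if_false]
      exact ih acc
    · rw [if_neg h]
      simp only [h, decide_false, Bool.not_false, if_true, List.map_cons]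
      rw [ih]
      simp [List.append_assoc]

-- a count over all fragments splits into the empty ones plus the non-empty ones
theorem countP_split (l : List String) (p : String → Bool) (hp : ∀ f, f.toList = [] → p f = true) :
    l.countP p = l.countP (fun f => decide (f.toList = []))
      + (l.filter (fun f => !decide (f.toList = []))).countP p := by
  induction l with
  | nil => simp
  | cons f t ih =>
    simp only [List.countP_cons, List.filter_cons]
    by_cases h : f.toList = []
    · simp only [h, decide_true, Bool.not_true, hp f h, Bool.false_eq_true, if_true, if_false, ih]
      omega
    · simp only [h, decide_false, Bool.not_false, Bool.false_eq_true, if_true, if_false,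
        List.countP_cons, ih]
      omega

-- shape of B's inner fold over zip: a count plus the advanced pointers
theorem zip_fold (i E : Int) (entries : List (Int × List Nat)) : ∀ (ptrs : List Nat) (acc : Int) (accP : List Nat),
    (entries.zip ptrs).foldl
      (fun (acc : Int × List Nat) pr =>
        let p := pvAdvance pr.1.2 i pr.1.2.length pr.2
        ((if p < pr.1.2.length ∧ ((pr.1.2.getD p 0 : Int)) + pr.1.1 ≤ E then acc.1 + 1 else acc.1),
          acc.2 ++ [p]))
      (acc, accP)
    = (acc + ((entries.zip ptrs).countP (fun pr =>
          decide (pvAdvance pr.1.2 i pr.1.2.length pr.2 < pr.1.2.length ∧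
            ((pr.1.2.getD (pvAdvance pr.1.2 i pr.1.2.length pr.2) 0 : Int)) + pr.1.1 ≤ E)) : Int),
        accP ++ (entries.zip ptrs).map (fun pr => pvAdvance pr.1.2 i pr.1.2.length pr.2)) := by
  induction entries with
  | nil => intro ptrs acc accP; simp
  | cons e t ih =>
    intro ptrs acc accP
    cases ptrs with
    | nil => simp
    | cons p pt =>
      simp only [List.zip_cons_cons, List.foldl_cons, List.map_cons, List.countP_cons, ih]
      rw [Prod.mk.injEq]
      refine ⟨?_, by simp⟩
      simp only [List.getD_eq_getElem?_getD, decide_eq_true_eq]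
      by_cases hc : pvAdvance e.2 i e.2.length p < e.2.length ∧ ((e.2[pvAdvance e.2 i e.2.length p]?.getD 0 : Nat) : Int) + e.1 ≤ E
      · rw [if_pos hc, if_pos hc]; push_cast; ring
      · rw [if_neg hc, if_neg hc]; push_cast; ring

-- pointer invariant for one fragment
def pvInv (lowered : List Char) (i : Int) (f : String) (p : Nat) : Prop :=
  p ≤ (pvOccsFrom lowered f.toList (lowered.length + 1) 0).length ∧
    ∀ q < p, (((pvOccsFrom lowered f.toList (lowered.length + 1) 0).getD q 0 : Int)) < i

-- per-window: B's zip count equals A's fragment count (over the non-empty fragments)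
theorem count_eq (lowered : List Char) (i L : Int) (hi : 0 ≤ i) (fl : List String) (ptrs : List Nat)
    (hF : List.Forall₂ (pvInv lowered i) fl ptrs) (hne : ∀ f ∈ fl, f.toList ≠ []) :
    ((fl.map (fun f => ((f.toList.length : Int), pvOccsFrom lowered f.toList (lowered.length + 1) 0))).zip ptrs).countP
        (fun pr => decide (pvAdvance pr.1.2 i pr.1.2.length pr.2 < pr.1.2.length ∧
          ((pr.1.2.getD (pvAdvance pr.1.2 i pr.1.2.length pr.2) 0 : Int)) + pr.1.1 ≤
            (if i + L < 0 then i + L + lowered.length else i + L)))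
    = fl.countP (fun f => PySem.Chars.isIn f.toList (PySem.List.slice lowered (some i) (some (i + L)))) := by
  induction hF with
  | nil => simp
  | @cons f p ft pt hfp htail ih =>
    simp only [List.map_cons, List.zip_cons_cons, List.countP_cons]
    rw [ih (fun g hg => hne g (List.mem_cons_of_mem f hg))]
    congr 1
    have hnef : f.toList ≠ [] := hne f List.mem_cons_self
    have hiff := cond_iff (pvOccsFrom lowered f.toList (lowered.length + 1) 0)
      (pvOccsFrom_pairwise lowered f.toList hnef (lowered.length + 1) 0 (by omega))
      i (if i + L < 0 then i + L + lowered.length else i + L) (f.toList.length : Int)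
      (pvOccsFrom lowered f.toList (lowered.length + 1) 0).length p
      (Nat.sub_le _ _) hfp.1 hfp.2
    have hwin := window_isIn lowered f.toList hnef i L hi
    simp only [decide_eq_true_eq]
    exact if_congr (hiff.trans hwin.symm) rfl rfl

-- the advanced pointers satisfy the invariant for every later window start
theorem ptrs_next (lowered : List Char) (i i' : Int) (hle : i ≤ i') (fl : List String) (ptrs : List Nat)
    (hF : List.Forall₂ (pvInv lowered i) fl ptrs) :
    List.Forall₂ (pvInv lowered i') fl
      (((fl.map (fun f => ((f.toList.length : Int), pvOccsFrom lowered f.toList (lowered.length + 1) 0))).zip ptrs).map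
        (fun pr => pvAdvance pr.1.2 i pr.1.2.length pr.2)) := by
  induction hF with
  | nil => simp
  | @cons f p ft pt hfp htail ih =>
    simp only [List.map_cons, List.zip_cons_cons]
    refine List.Forall₂.cons ?_ ih
    obtain ⟨hpp, hple, hskip', hstop⟩ := pvAdvance_spec (pvOccsFrom lowered f.toList (lowered.length + 1) 0) i
      (pvOccsFrom lowered f.toList (lowered.length + 1) 0).length p (Nat.sub_le _ _) hfp.1 hfp.2
    exact ⟨hple, fun q hq => lt_of_lt_of_le (hskip' q hq) hle⟩

theorem forall₂_replicate_zero (lowered : List Char) (i : Int) (fl : List String) :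
    List.Forall₂ (pvInv lowered i) fl (List.replicate fl.length 0) := by
  induction fl with
  | nil => simp
  | cons f t ih =>
    exact List.Forall₂.cons ⟨Nat.zero_le _, by omega⟩ ih

theorem pyRange_facts (b : Int) :
    (∀ x ∈ PySem.List.pyRange 0 b 10, 0 ≤ x) ∧ (PySem.List.pyRange 0 b 10).Pairwise (· ≤ ·) := by
  constructor
  · intro x hx
    have := (PySem.List.mem_pyRange_iff_of_pos (by norm_num : (0:Int) < 10) x).mp hx
    omega
  · rw [PySem.List.pyRange_of_pos 0 b (by norm_num)]
    exact List.Pairwise.map _ (fun a b h => by omega) List.pairwise_lt_range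


-- the main loop of A and the main loop of B, run over the same window starts, stay related
theorem outer_fold (page : String) (fragments : List String) (L : Int) (hL : 0 ≤ L) :
    ∀ (l : List Int), (∀ x ∈ l, 0 ≤ x) → l.Pairwise (· ≤ ·) →
    ∀ (sA : Int) (wA : String) (bB : Int × Option Int) (ptrs : List Nat),
      sA = bB.1 →
      wA = (match bB.2 with
        | none => PySem.Str.slice page none (some L)
        | some i => PySem.Str.slice page (some i) (some (i + L))) →
      (∀ x ∈ l, List.Forall₂ (pvInv (PySem.Chars.lower page.toList) x)
        (fragments.filter (fun f => !decide (f.toList = []))) ptrs) →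
      ((l.foldl (fun (st : Int × String) i =>
          let window := PySem.Str.slice page (some i) (some (i + L))
          let score := fragments.foldl
            (fun (acc : Int) frag =>
              if PySem.Str.isIn frag (PySem.Str.lower window) then acc + 1 else acc) 0
          if st.1 < score then (score, window) else st) (sA, wA)).1
        = (l.foldl (fun (st : (Int × Option Int) × List Nat) i =>
            let e := i + L
            let inner := (((fragments.filter (fun f => !decide (f.toList = []))).map
                (fun f => ((f.toList.length : Int),
                  pvOccsFrom (PySem.Chars.lower page.toList) f.toList ((PySem.Chars.lower page.toList).length + 1) 0))).zip st.2).foldl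
              (fun (acc : Int × List Nat) pr =>
                let p := pvAdvance pr.1.2 i pr.1.2.length pr.2
                let sc := if p < pr.1.2.length ∧ ((pr.1.2.getD p 0 : Int)) + pr.1.1 ≤ e
                          then acc.1 + 1 else acc.1
                (sc, acc.2 ++ [p]))
              (fragments.foldl (fun (acc : Int) frag =>
                if frag.toList = [] then acc + 1 else acc) 0, [])
            let best := if st.1.1 < inner.1 then (inner.1, some i) else st.1
            (best, inner.2)) (bB, ptrs)).1.1 ∧
       (l.foldl (fun (st : Int × String) i =>
          let window := PySem.Str.slice page (some i) (some (i + L))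
          let score := fragments.foldl
            (fun (acc : Int) frag =>
              if PySem.Str.isIn frag (PySem.Str.lower window) then acc + 1 else acc) 0
          if st.1 < score then (score, window) else st) (sA, wA)).2
        = (match (l.foldl (fun (st : (Int × Option Int) × List Nat) i =>
            let e := i + L
            let inner := (((fragments.filter (fun f => !decide (f.toList = []))).map
                (fun f => ((f.toList.length : Int),
                  pvOccsFrom (PySem.Chars.lower page.toList) f.toList ((PySem.Chars.lower page.toList).length + 1) 0))).zip st.2).foldl
              (fun (acc : Int × List Nat) pr =>
                let p := pvAdvance pr.1.2 i pr.1.2.length pr.2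
                let sc := if p < pr.1.2.length ∧ ((pr.1.2.getD p 0 : Int)) + pr.1.1 ≤ e
                          then acc.1 + 1 else acc.1
                (sc, acc.2 ++ [p]))
              (fragments.foldl (fun (acc : Int) frag =>
                if frag.toList = [] then acc + 1 else acc) 0, [])
            let best := if st.1.1 < inner.1 then (inner.1, some i) else st.1
            (best, inner.2)) (bB, ptrs)).1.2 with
          | none => PySem.Str.slice page none (some L)
          | some i => PySem.Str.slice page (some i) (some (i + L)))) := by
  intro l
  induction l with
  | nil =>
    intro _ _ sA wA bB ptrs hs hw _
    exact ⟨hs, hw⟩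
  | cons i t ih =>
    intro hl0 hpair sA wA bB ptrs hs hw hF
    simp only [List.foldl_cons]
    have hi0 : 0 ≤ i := hl0 i List.mem_cons_self
    have hne : ∀ f ∈ fragments.filter (fun f => !decide (f.toList = [])), f.toList ≠ [] := by
      intro f hf
      have := (List.mem_filter.mp hf).2
      simpa using this
    -- A's window predicate, moved to the char level
    have hPA : ∀ f : String,
        PySem.Str.isIn f (PySem.Str.lower (PySem.Str.slice page (some i) (some (i + L))))
          = PySem.Chars.isIn f.toList
              (PySem.List.slice (PySem.Chars.lower page.toList) (some i) (some (i + L))) := by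
      intro f
      rw [PySem.Str.isIn_eq, PySem.Str.toList_lower, PySem.Str.toList_slice,
        PySem.Chars.slice_eq_listSlice, lower_slice]
    -- per-window scores agree
    have hscore :
        fragments.foldl (fun (acc : Int) frag =>
            if PySem.Str.isIn frag (PySem.Str.lower (PySem.Str.slice page (some i) (some (i + L))))
            then acc + 1 else acc) 0
        = ((((fragments.filter (fun f => !decide (f.toList = []))).map
              (fun f => ((f.toList.length : Int),
                pvOccsFrom (PySem.Chars.lower page.toList) f.toList ((PySem.Chars.lower page.toList).length + 1) 0))).zip ptrs).foldl
            (fun (acc : Int × List Nat) pr =>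
              let p := pvAdvance pr.1.2 i pr.1.2.length pr.2
              let sc := if p < pr.1.2.length ∧ ((pr.1.2.getD p 0 : Int)) + pr.1.1 ≤ i + L
                  then acc.1 + 1 else acc.1
              (sc, acc.2 ++ [p]))
            (fragments.foldl (fun (acc : Int) frag =>
              if frag.toList = [] then acc + 1 else acc) 0, [])).1 := by
      rw [zip_fold]
      rw [PySem.List.foldl_if_add_one
        (fun frag => PySem.Str.isIn frag (PySem.Str.lower (PySem.Str.slice page (some i) (some (i + L)))))]
      have hbase : fragments.foldl (fun (acc : Int) frag => if frag.toList = [] then acc + 1 else acc) 0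
          = ((fragments.countP (fun f => decide (f.toList = [])) : Nat) : Int) := by
        rw [PySem.List.foldl_ite_add_one (fun frag => frag.toList = []) fragments 0]
        ring
      rw [hbase]
      have hcnt := count_eq (PySem.Chars.lower page.toList) i L hi0
        (fragments.filter (fun f => !decide (f.toList = []))) ptrs
        (hF i List.mem_cons_self) hne
      have hcoll : (if i + L < 0 then i + L + ((PySem.Chars.lower page.toList).length : Int) else i + L) = i + L :=
        if_neg (by omega)
      rw [hcoll] at hcnt
      rw [hcnt]
      have hsplit := countP_split fragments
        (fun frag => PySem.Str.isIn frag (PySem.Str.lower (PySem.Str.slice page (some i) (some (i + L)))))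
        (by
          intro f hf
          show PySem.Str.isIn f (PySem.Str.lower (PySem.Str.slice page (some i) (some (i + L)))) = true
          rw [hPA f, hf]
          exact PySem.Chars.isIn_nil _)
      rw [hsplit]
      have hfil : (fragments.filter (fun f => !decide (f.toList = []))).countP
            (fun frag => PySem.Str.isIn frag (PySem.Str.lower (PySem.Str.slice page (some i) (some (i + L)))))
          = (fragments.filter (fun f => !decide (f.toList = []))).countP
            (fun f => PySem.Chars.isIn f.toList
              (PySem.List.slice (PySem.Chars.lower page.toList) (some i) (some (i + L)))) := by
        refine List.countP_congr ?_
        intro f _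
        rw [hPA f]
      rw [hfil]
      push_cast
      ring
    -- the advanced pointer list produced by the inner fold
    have hsnd : ((((fragments.filter (fun f => !decide (f.toList = []))).map
            (fun f => ((f.toList.length : Int),
              pvOccsFrom (PySem.Chars.lower page.toList) f.toList ((PySem.Chars.lower page.toList).length + 1) 0))).zip ptrs).foldl
          (fun (acc : Int × List Nat) pr =>
            let p := pvAdvance pr.1.2 i pr.1.2.length pr.2
            let sc := if p < pr.1.2.length ∧ ((pr.1.2.getD p 0 : Int)) + pr.1.1 ≤ i + L
                      then acc.1 + 1 else acc.1
            (sc, acc.2 ++ [p]))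
          (fragments.foldl (fun (acc : Int) frag =>
            if frag.toList = [] then acc + 1 else acc) 0, [])).2
        = (((fragments.filter (fun f => !decide (f.toList = []))).map
            (fun f => ((f.toList.length : Int),
              pvOccsFrom (PySem.Chars.lower page.toList) f.toList ((PySem.Chars.lower page.toList).length + 1) 0))).zip ptrs).map
          (fun pr => pvAdvance pr.1.2 i pr.1.2.length pr.2) := by
      rw [zip_fold]
      simp
    -- step comparison and recursion
    by_cases hcmp : sA < fragments.foldl (fun (acc : Int) frag =>
        if PySem.Str.isIn frag (PySem.Str.lower (PySem.Str.slice page (some i) (some (i + L))))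
        then acc + 1 else acc) 0
    · rw [if_pos hcmp, if_pos (by rw [← hs, ← hscore]; exact hcmp)]
      apply ih (fun x hx => hl0 x (List.mem_cons_of_mem i hx)) (List.Pairwise.of_cons hpair)
      · rw [hscore]
      · rfl
      · intro x hx
        have hle : i ≤ x := (List.pairwise_cons.mp hpair).1 x hx
        have hnext := ptrs_next (PySem.Chars.lower page.toList) i x hle
          (fragments.filter (fun f => !decide (f.toList = []))) ptrs (hF i List.mem_cons_self)
        rw [hsnd]
        exact hnext
    · rw [if_neg hcmp, if_neg (by rw [← hs, ← hscore]; exact hcmp)]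
      apply ih (fun x hx => hl0 x (List.mem_cons_of_mem i hx)) (List.Pairwise.of_cons hpair)
      · exact hs
      · exact hw
      · intro x hx
        have hle : i ≤ x := (List.pairwise_cons.mp hpair).1 x hx
        have hnext := ptrs_next (PySem.Chars.lower page.toList) i x hle
          (fragments.filter (fun f => !decide (f.toList = []))) ptrs (hF i List.mem_cons_self)
        rw [hsnd]
        exact hnext

-- ===== VERDICT (by name: the statement is the Claim_ definition above) =====
theorem extract_best_snippet_py_spec : Claim_equal_extract_best_snippet_py := by
  intro page fragments length _ hpre
  unfold Spec_extract_best_snippet_py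
  unfold extract_best_snippet_py extract_best_snippet_py_alt
  simp only [indexed_eq, List.nil_append, List.length_map]
  have hof := outer_fold page fragments length hpre
    (PySem.List.pyRange 0 ((page.toList.length : Int) - length) 10)
    (pyRange_facts _).1 (pyRange_facts _).2
    0 (PySem.Str.slice page none (some length)) ((0 : Int), (none : Option Int))
    (List.replicate (fragments.filter (fun f => !decide (f.toList = []))).length 0)
    rfl rfl
    (fun x _ => forall₂_replicate_zero (PySem.Chars.lower page.toList) x
      (fragments.filter (fun f => !decide (f.toList = []))))
  rw [hof.2]
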